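-- pv_equiv track=rewrite | github.com/sillsdev/FieldWorks | convert_nunit.py | skip_verbatim_string
-- ===== SOURCE A (Python) =====
-- def skip_verbatim_string(text: str, start: int) -> int:
--     # start points to '@'
--     i = start + 2  # skip @"
--     while i < len(text):
--         if text[i] == '"':
--             if i + 1 < len(text) and text[i + 1] == '"':
--                 i += 2
--                 continue
--             return i
--         i += 1
--     return len(text) - 1
-- ===== SOURCE B (Python) =====
-- def skip_verbatim_string(text: str, start: int) -> int:
--     # Jump between double-quote positions with str.find instead of
--     # examining every character.
--     i = start + 2  # skip @"
--     while True:
--         j = text.find('"', i)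
--         if j == -1:
--             return len(text) - 1
--         if j + 1 < len(text) and text[j + 1] == '"':
--             i = j + 2  # doubled quote: skip the pair
--             continue
--         return j
-- ===== Notes on version B (the rewrite author's own statement) =====
-- stated objective: faster
-- what changed: B replaces the character-by-character while loop with a loop over str.find('"', i) results, jumping straight from one double-quote to the next (find scans at C speed, so far fewer interpreted steps); Pre_ excludes start <= -3, where A's scan indexes text with a negative index and either raises IndexError or accidentally wraps around to scan from the end of the string.
-- outside the precondition, e.g. on skip_verbatim_string('ab"x', -5): A returns -2, B returns 2; on skip_verbatim_string('', -3): A raises IndexError, B returns -1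
import Mathlib
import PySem

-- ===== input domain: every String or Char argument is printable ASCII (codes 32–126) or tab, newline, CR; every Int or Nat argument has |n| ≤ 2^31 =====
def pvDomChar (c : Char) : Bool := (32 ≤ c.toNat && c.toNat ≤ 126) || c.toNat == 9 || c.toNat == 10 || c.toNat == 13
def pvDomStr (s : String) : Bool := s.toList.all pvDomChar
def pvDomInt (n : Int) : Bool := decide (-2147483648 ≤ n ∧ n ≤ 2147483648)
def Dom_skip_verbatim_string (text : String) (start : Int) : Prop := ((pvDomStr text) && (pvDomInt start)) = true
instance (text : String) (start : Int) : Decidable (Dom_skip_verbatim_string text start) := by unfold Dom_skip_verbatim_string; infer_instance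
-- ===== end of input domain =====

-- B replaces A's character-by-character scan with a loop over str.find positions (idiomatic); equal on start ≥ -2.

-- ===== PORT A =====
-- termination measure of A's while loop (cited by decreasing_by)
theorem pvA_dec (t : List Char) (i d : Int) (h : i < (t.length : Int)) (hd : 1 ≤ d) :
    ((t.length : Int) - (i + d)).toNat < ((t.length : Int) - i).toNat := by omega

-- A's while loop: i scans one character at a time
def pvALoop (t : List Char) (i : Int) : Int :=
  if _h : i < (t.length : Int) then
    match PySem.List.pyGet? t i with
    | some c =>
      if c = '"' then
        if i + 1 < (t.length : Int) ∧ PySem.List.pyGet? t (i + 1) = some '"' then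
          pvALoop t (i + 2)
        else i
      else pvALoop t (i + 1)
    | none => 0  -- Python raises IndexError here (i < -len); outside Pre_
  else (t.length : Int) - 1
termination_by ((t.length : Int) - i).toNat
decreasing_by
  · exact pvA_dec t i 2 _h (by omega)
  · exact pvA_dec t i 1 _h (by omega)

def skip_verbatim_string (text : String) (start : Int) : Int :=
  pvALoop text.toList (start + 2)

-- ===== PORT B =====
-- B's while True loop: jump from quote to quote with find. The fuel argument only makes the
-- loop structurally recursive; t.length + 2 steps always suffice (each iteration advances i
-- by at least 2 once i ≥ 0, and the loop exits as soon as find fails).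
def pvBLoop (t : List Char) : Nat → Int → Int
  | 0, _ => 0  -- never reached with fuel = t.length + 2
  | fuel + 1, i =>
    let j := PySem.Chars.findFrom t ['"'] i
    if j = -1 then (t.length : Int) - 1
    else if j + 1 < (t.length : Int) ∧ PySem.List.pyGet? t (j + 1) = some '"' then
      pvBLoop t fuel (j + 2)
    else j

def skip_verbatim_string_alt (text : String) (start : Int) : Int :=
  pvBLoop text.toList (text.toList.length + 2) (start + 2)

-- ===== PRECONDITION & SPEC =====
-- Pre_ excludes start ≤ -3, where A's loop indexes text with a NEGATIVE index: it raises
-- IndexError when start+2 < -len(text) and otherwise accidentally wraps around and scans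
-- from the end of the string — an artefact of Python negative indexing that B's find (which
-- clamps its start bound) does not reproduce.
def Pre_skip_verbatim_string (text : String) (start : Int) : Prop := -2 ≤ start
instance (text : String) (start : Int) : Decidable (Pre_skip_verbatim_string text start) := by
  unfold Pre_skip_verbatim_string; infer_instance
def pvWitness_skip_verbatim_string : String × Int := ("@\"ab\"c", 0)

def Spec_skip_verbatim_string (text : String) (start : Int) (out : Int) : Prop :=
  out = skip_verbatim_string_alt text start
instance (text : String) (start : Int) (out : Int) : Decidable (Spec_skip_verbatim_string text start out) := by
  unfold Spec_skip_verbatim_string; infer_instance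

-- ===== CLAIM (what is proved, stated in full; the proofs are below) =====
def Claim_equal_skip_verbatim_string : Prop := ∀ (text : String) (start : Int), Dom_skip_verbatim_string text start → Pre_skip_verbatim_string text start → Spec_skip_verbatim_string text start (skip_verbatim_string text start)

-- ===== LEMMAS AND PROOFS =====

theorem pv_singleton_prefix_iff {α : Type} (a : α) (l : List α) : [a] <+: l ↔ l.head? = some a := by
  cases l <;> simp [List.cons_prefix_cons, eq_comm]

theorem pv_prefix_drop_iff (t : List Char) (m : Nat) :
    ['"'] <+: t.drop m ↔ t[m]? = some '"' := by
  rw [pv_singleton_prefix_iff, List.head?_drop]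

theorem pv_quote_infix (t : List Char) (k m : Nat) (hkm : k ≤ m) (hq : t[m]? = some '"') :
    ['"'] <:+: t.drop k := by
  have h1 : ['"'] <+: (t.drop k).drop (m - k) := by
    rw [List.drop_drop]
    have : k + (m - k) = m := by omega
    rw [this]
    exact (pv_prefix_drop_iff t m).2 hq
  exact h1.isInfix.trans (List.drop_suffix (m - k) (t.drop k)).isInfix

theorem pv_findFrom_gt (t : List Char) (k : Nat) (h : t.length < k) :
    PySem.Chars.findFrom t ['"'] (k : Int) = -1 := by
  simp only [PySem.Chars.findFrom]
  rw [if_neg (show ¬((k : Int) < 0) by omega)]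
  exact if_pos (by exact_mod_cast h)

theorem pv_findFrom_ge (t : List Char) (k : Nat) (h : t.length ≤ k) :
    PySem.Chars.findFrom t ['"'] (k : Int) = -1 := by
  rcases Nat.lt_or_ge t.length k with hlt | hge
  · exact pv_findFrom_gt t k hlt
  · have hk : k = t.length := by omega
    subst hk
    rw [PySem.Chars.findFrom_natCast_eq_neg_one_iff t ['"'] t.length le_rfl]
    simp

theorem pv_aLoop_skip (t : List Char) (k q : Nat) (hkq : k ≤ q) (hq : q ≤ t.length)
    (hno : ∀ m, k ≤ m → m < q → t[m]? ≠ some '"') :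
    pvALoop t k = pvALoop t q := by
  induction q, hkq using Nat.le_induction with
  | base => rfl
  | succ n hn ih =>
      have hnlen : n < t.length := by omega
      have step : pvALoop t (n : Int) = pvALoop t ((n + 1 : Nat) : Int) := by
        rw [pvALoop]
        have hlt : ((n : Int) < (t.length : Int)) := by exact_mod_cast hnlen
        rw [dif_pos hlt, PySem.List.pyGet?_natCast, List.getElem?_eq_getElem hnlen]
        have hne : t[n] ≠ '"' := by
          intro hc
          exact hno n hn (by omega) (by rw [List.getElem?_eq_getElem hnlen, hc])
        simp only [hne, if_false]
        norm_num
      rw [ih (by omega) (fun m h1 h2 => hno m h1 (by omega)), step]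

theorem pv_aLoop_ge (t : List Char) (i : Int) (h : (t.length : Int) ≤ i) :
    pvALoop t i = (t.length : Int) - 1 := by
  rw [pvALoop, dif_neg (by omega)]

theorem pv_bLoop_ge (t : List Char) (f : Nat) (k : Nat) (h : t.length ≤ k) :
    pvBLoop t (f + 1) (k : Int) = (t.length : Int) - 1 := by
  simp [pvBLoop, pv_findFrom_ge t k h]

theorem pv_loop_eq_aux (t : List Char) (f : Nat) :
    ∀ k : Nat, t.length + 3 ≤ k + 2 * f → k ≤ t.length + 1 →
      pvALoop t (k : Int) = pvBLoop t f (k : Int) := by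
  induction f with
  | zero => intro k hf hk; omega
  | succ n ih =>
    intro k hf hk
    by_cases hj : PySem.Chars.findFrom t ['"'] (k : Int) = -1
    · by_cases hge : t.length ≤ k
      · rw [pv_aLoop_ge t k (by exact_mod_cast hge), pv_bLoop_ge t n k hge]
      · have hlen : k < t.length := by omega
        -- no quote at any position ≥ k: A scans to the end, B returns len-1 at once
        have hno : ∀ m, k ≤ m → m < t.length → t[m]? ≠ some '"' := by
          intro m h1 h2 hc
          rw [PySem.Chars.findFrom_natCast_eq_neg_one_iff t ['"'] k (by omega)] at hj
          exact hj (pv_quote_infix t k m h1 hc)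
        rw [pv_aLoop_skip t k t.length (by omega) le_rfl hno,
            pv_aLoop_ge t t.length le_rfl]
        simp [pvBLoop, hj]
    · have hkl : k ≤ t.length := by
        by_contra hgt
        exact hj (pv_findFrom_gt t k (by omega))
      obtain ⟨hki, hpre, hmin⟩ := PySem.Chars.findFrom_natCast_spec t ['"'] k hkl hj
      set j := PySem.Chars.findFrom t ['"'] (k : Int) with hjdef
      have hj0 : (0 : Int) ≤ j := le_trans (by omega) hki
      have hjc : ((j.toNat : Nat) : Int) = j := Int.toNat_of_nonneg hj0
      have hq : t[j.toNat]? = some '"' := (pv_prefix_drop_iff t j.toNat).1 hpre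
      have hjlt : j.toNat < t.length := (List.getElem?_eq_some_iff.mp hq).1
      have hkj : k ≤ j.toNat := by omega
      have hnoq : ∀ m, k ≤ m → m < j.toNat → t[m]? ≠ some '"' := fun m h1 h2 hc =>
        hmin m h1 h2 ((pv_prefix_drop_iff t m).2 hc)
      rw [pv_aLoop_skip t k j.toNat hkj (by omega) hnoq]
      -- one step of A's scan at the quote position, against one step of B
      rw [pvALoop]
      rw [dif_pos (by exact_mod_cast hjlt), PySem.List.pyGet?_natCast, hq]
      simp only [pvBLoop, hjc, reduceIte]
      rw [← hjdef, if_neg hj]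
      by_cases hcond : j + 1 < (t.length : Int) ∧ PySem.List.pyGet? t (j + 1) = some '"'
      · rw [if_pos hcond, if_pos hcond]
        have h2 : j + 2 = (((j.toNat + 2 : Nat)) : Int) := by push_cast; omega
        rw [h2]
        exact ih (j.toNat + 2) (by omega) (by omega)
      · rw [if_neg hcond, if_neg hcond]

theorem pv_loop_eq (t : List Char) (k : Nat) :
    pvALoop t (k : Int) = pvBLoop t (t.length + 2) (k : Int) := by
  by_cases hk : k ≤ t.length + 1
  · exact pv_loop_eq_aux t (t.length + 2) k (by omega) hk
  · rw [pv_aLoop_ge t k (by exact_mod_cast (by omega : t.length ≤ k))]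
    exact (pv_bLoop_ge t (t.length + 1) k (by omega)).symm

-- ===== VERDICT (by name: the statement is the Claim_ definition above) =====
theorem skip_verbatim_string_spec : Claim_equal_skip_verbatim_string := by
  intro text start _hd hpre
  unfold Spec_skip_verbatim_string skip_verbatim_string skip_verbatim_string_alt
  have h2 : (0:Int) ≤ start + 2 := by
    unfold Pre_skip_verbatim_string at hpre; omega
  have : start + 2 = (((start + 2).toNat : Nat) : Int) := by omega
  rw [this, pv_loop_eq]
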